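-- pv_equiv track=rewrite | github.com/yard74/HW-Open_Read_Write | main.py | get_sorted_files_dict
-- ===== SOURCE A (Python) =====
-- def get_sorted_files_dict(files_dict):
--     sorted_values = sorted(files_dict.values())
--     sorted_files_dict = {}
--     for value in sorted_values:
--         for key in files_dict.keys():
--             if files_dict[key] == value:
--                 sorted_files_dict[key] = files_dict[key]
--                 break
--     return sorted_files_dict
-- ===== SOURCE B (Python) =====
-- def get_sorted_files_dict(files_dict):
--     first_key = {}
--     for key, value in files_dict.items():
--         if value not in first_key:
--             first_key[value] = key
--     return {first_key[v]: v for v in sorted(first_key)}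
-- ===== Notes on version B (the rewrite author's own statement) =====
-- stated objective: faster
-- what changed: Replaces A's per-value rescans of all keys (sorting values with duplicates, then a linear key search for each) with one pass building a value->first-key dict and a single sort of the distinct values.
import Mathlib
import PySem

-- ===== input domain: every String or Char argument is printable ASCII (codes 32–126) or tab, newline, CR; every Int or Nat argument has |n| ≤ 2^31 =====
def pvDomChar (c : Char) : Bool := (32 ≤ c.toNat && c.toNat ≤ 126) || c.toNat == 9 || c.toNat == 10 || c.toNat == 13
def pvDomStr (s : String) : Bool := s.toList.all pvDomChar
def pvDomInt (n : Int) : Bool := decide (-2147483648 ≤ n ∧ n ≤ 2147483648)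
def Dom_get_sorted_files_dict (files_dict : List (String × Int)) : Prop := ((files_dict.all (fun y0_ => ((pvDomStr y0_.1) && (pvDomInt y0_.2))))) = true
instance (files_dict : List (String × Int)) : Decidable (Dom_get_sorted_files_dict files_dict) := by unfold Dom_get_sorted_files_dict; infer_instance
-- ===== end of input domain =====

-- B replaces A's per-value rescan of all keys (sort all values, linear key search for each)
-- by a one-pass value→first-key dict plus one sort of the distinct values (objective: faster).

-- ===== PORT A =====
-- inner 'for key in files_dict.keys(): if files_dict[key] == value: …; break' loop
def pvAInner (d : PySem.Dict String Int) (v : Int) (acc : PySem.Dict String Int) : List String → PySem.Dict String Int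
  | [] => acc
  | k :: ks => if d.getD k 0 = v then acc.insert k (d.getD k 0) else pvAInner d v acc ks

def get_sorted_files_dict (files_dict : List (String × Int)) : List (String × Int) :=
  let d := PySem.Dict.ofList files_dict
  let sorted_values := PySem.List.sorted d.values (fun v => v) false
  (sorted_values.foldl (fun acc v => pvAInner d v acc d.keys) PySem.Dict.empty).items

-- ===== PORT B =====
def get_sorted_files_dict_alt (files_dict : List (String × Int)) : List (String × Int) :=
  let d := PySem.Dict.ofList files_dict
  let first_key := d.items.foldl
      (fun fk p => if fk.contains p.2 then fk else fk.insert p.2 p.1)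
      (PySem.Dict.empty : PySem.Dict Int String)
  ((PySem.List.sorted first_key.keys (fun v => v) false).foldl
      (fun out v => out.insert (first_key.getD v "") v)
      (PySem.Dict.empty : PySem.Dict String Int)).items

-- ===== PRECONDITION & SPEC =====
def Spec_get_sorted_files_dict (files_dict : List (String × Int)) (out : List (String × Int)) : Prop := out = get_sorted_files_dict_alt files_dict
instance (files_dict : List (String × Int)) (out : List (String × Int)) : Decidable (Spec_get_sorted_files_dict files_dict out) := by unfold Spec_get_sorted_files_dict; infer_instance

-- ===== CLAIM (what is proved, stated in full; the proofs are below) =====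
def Claim_equal_get_sorted_files_dict : Prop := ∀ (files_dict : List (String × Int)), Dom_get_sorted_files_dict files_dict → Spec_get_sorted_files_dict files_dict (get_sorted_files_dict files_dict)

-- ===== LEMMAS AND PROOFS =====

-- the first key of an item whose value is v (the key A's inner scan stops at)
def pvK (l : List (String × Int)) (v : Int) : String :=
  ((l.find? (fun p => p.2 == v)).map Prod.fst).getD ""

theorem pvAInner_eq (d : PySem.Dict String Int) (hnd : d.keys.Nodup) (v : Int)
    (acc : PySem.Dict String Int) (l : List (String × Int)) (hsub : ∀ p ∈ l, p ∈ d.items) :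
    pvAInner d v acc (l.map Prod.fst)
      = (match l.find? (fun p => p.2 == v) with
         | some p => acc.insert p.1 v
         | none => acc) := by
  induction l with
  | nil => simp [pvAInner]
  | cons p t ih =>
    have hpv : d.getD p.1 0 = p.2 :=
      PySem.Dict.getD_of_mem_items d (by simpa using hsub p List.mem_cons_self) hnd 0
    by_cases h : p.2 = v
    · simp [pvAInner, hpv, h]
    · have hb : (p.2 == v) = false := by simp [h]
      simp only [List.map_cons, pvAInner, hpv, h, if_false, List.find?_cons, hb]
      exact ih (fun q hq => hsub q (List.mem_cons_of_mem _ hq))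

theorem pvMatch_eq (l : List (String × Int)) (v : Int) (acc : PySem.Dict String Int)
    (hv : v ∈ l.map Prod.snd) :
    (match l.find? (fun p => p.2 == v) with
     | some p => acc.insert p.1 v
     | none => acc) = acc.insert (pvK l v) v := by
  obtain ⟨p, hp, rfl⟩ := List.mem_map.mp hv
  have hps : (l.find? (fun r => r.2 == p.2)).isSome := List.find?_isSome.mpr ⟨p, hp, by simp⟩
  obtain ⟨p', hp'⟩ := Option.isSome_iff_exists.mp hps
  rw [hp']
  simp [pvK, hp']

theorem pvFk_get? (l : List (String × Int)) (acc : PySem.Dict Int String) (v : Int) :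
    (l.foldl (fun fk p => if fk.contains p.2 then fk else fk.insert p.2 p.1) acc).get? v
      = Option.or (acc.get? v) ((l.find? (fun p => p.2 == v)).map Prod.fst) := by
  induction l generalizing acc with
  | nil => simp
  | cons p t ih =>
    simp only [List.foldl_cons, List.find?_cons]
    by_cases hc : acc.contains p.2
    · rw [if_pos hc, ih]
      by_cases h : p.2 = v
      · subst h
        obtain ⟨w, hw⟩ : ∃ w, acc.get? p.2 = some w := by
          have := PySem.Dict.contains_eq_isSome_get? acc p.2
          rw [hc] at this
          exact Option.isSome_iff_exists.mp this.symm
        simp [hw]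
      · simp [show (p.2 == v) = false by simp [h]]
    · rw [if_neg hc, ih]
      by_cases h : p.2 = v
      · subst h
        have hnone : acc.get? p.2 = none :=
          (PySem.Dict.get?_eq_none_iff_contains acc p.2).mpr (by simpa using hc)
        simp [hnone]
      · simp [PySem.Dict.get?_insert, (Ne.symm h : v ≠ p.2), show (p.2 == v) = false by simp [h]]

theorem pvFk_keys (l : List (String × Int)) (acc : PySem.Dict Int String) :
    (l.foldl (fun fk p => if fk.contains p.2 then fk else fk.insert p.2 p.1) acc).keys
      = PySem.Set.update acc.keys (l.map Prod.snd) := by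
  induction l generalizing acc with
  | nil => simp
  | cons p t ih =>
    simp only [List.foldl_cons, List.map_cons, PySem.Set.update_cons]
    by_cases hc : acc.contains p.2
    · rw [if_pos hc, ih, PySem.Set.add_of_mem ((PySem.Dict.contains_iff_mem_keys acc p.2).mp hc)]
    · rw [if_neg hc, ih, PySem.Dict.keys_insert_of_not_contains _ _ (by simpa using hc),
        PySem.Set.add_of_not_mem (fun hm => hc ((PySem.Dict.contains_iff_mem_keys acc p.2).mpr hm))]

theorem pvFoldInsert (K : Int → String) (vs : List Int) (s : PySem.Set Int) (d : PySem.Dict String Int)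
    (hd : d.items = s.map (fun v => (K v, v)))
    (hinj : ∀ v ∈ s ++ vs, ∀ w ∈ s ++ vs, K v = K w → v = w) :
    (vs.foldl (fun d v => d.insert (K v) v) d).items
      = (PySem.Set.update s vs).map (fun v => (K v, v)) := by
  induction vs generalizing s d with
  | nil => simpa using hd
  | cons v t ih =>
    have hkeys : d.keys = s.map K := by
      show d.items.map Prod.fst = _
      rw [hd, List.map_map]; rfl
    simp only [List.foldl_cons, PySem.Set.update_cons]
    by_cases hv : v ∈ s
    · have hc : d.contains (K v) = true :=
        (PySem.Dict.contains_iff_mem_keys d (K v)).mpr (hkeys ▸ List.mem_map_of_mem hv)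
      have hitems : (d.insert (K v) v).items = s.map (fun u => (K u, u)) := by
        rw [PySem.Dict.items_insert_of_contains d v hc, hd, List.map_map]
        apply List.map_congr_left
        intro u hu
        by_cases he : K u = K v
        · have : u = v := hinj u (by simp [hu]) v (by simp) he
          simp [Function.comp, this]
        · simp [Function.comp, he]
      rw [PySem.Set.add_of_mem hv]
      exact ih s _ hitems (fun a ha b hb => hinj a (by simp at ha ⊢; tauto) b (by simp at hb ⊢; tauto))
    · have hc : d.contains (K v) = false := by
        rw [PySem.Dict.contains_eq_decide_mem_keys, hkeys, decide_eq_false_iff_not]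
        intro hm
        obtain ⟨u, hu, he⟩ := List.mem_map.mp hm
        exact hv (hinj v (by simp) u (by simp [hu]) he.symm ▸ hu)
      have hitems : (d.insert (K v) v).items = (s ++ [v]).map (fun u => (K u, u)) := by
        rw [PySem.Dict.items_insert_of_not_contains d v hc, hd, List.map_append]; rfl
      rw [PySem.Set.add_of_not_mem hv]
      exact ih (s ++ [v]) _ hitems
        (fun a ha b hb => hinj a (by simp at ha ⊢; tauto) b (by simp at hb ⊢; tauto))

theorem pvOfList_sublist {α : Type} [BEq α] [LawfulBEq α] (l : List α) :
    (PySem.Set.ofList l).Sublist l := by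
  induction l using List.reverseRecOn with
  | nil => simp [PySem.Set.ofList]
  | append_singleton xs x ih =>
    rw [PySem.Set.ofList_append_singleton, PySem.Set.add_eq_ite]
    split
    · exact ih.trans (List.sublist_append_left xs [x])
    · exact List.Sublist.append ih (List.Sublist.refl [x])

theorem pvSorted_ofList (xs : List Int) :
    PySem.List.sorted (PySem.Set.ofList xs) (fun v => v) false
      = PySem.Set.ofList (PySem.List.sorted xs (fun v => v) false) := by
  apply PySem.List.sorted_eq_of_perm_of_pairwise_lt
  · rw [List.perm_ext_iff_of_nodup (PySem.Set.nodup_ofList _) (PySem.Set.nodup_ofList _)]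
    intro a
    simp [PySem.Set.mem_ofList, PySem.List.mem_sorted]
  · have hle : (PySem.Set.ofList (PySem.List.sorted xs (fun v => v) false)).Pairwise (fun a b => a ≤ b) :=
      (PySem.List.sorted_pairwise xs (fun v => v)).sublist (pvOfList_sublist _)
    have hne : (PySem.Set.ofList (PySem.List.sorted xs (fun v => v) false)).Pairwise (fun a b => a ≠ b) :=
      PySem.Set.nodup_ofList _
    exact (hle.and hne).imp (fun h => lt_of_le_of_ne h.1 h.2)

theorem pvK_inj (l : List (String × Int)) (h : (l.map Prod.fst).Nodup) (v w : Int)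
    (hv : v ∈ l.map Prod.snd) (hw : w ∈ l.map Prod.snd) (hkv : pvK l v = pvK l w) : v = w := by
  obtain ⟨p, hp, rfl⟩ := List.mem_map.mp hv
  obtain ⟨q, hq, rfl⟩ := List.mem_map.mp hw
  have hps : (l.find? (fun r => r.2 == p.2)).isSome := List.find?_isSome.mpr ⟨p, hp, by simp⟩
  have hqs : (l.find? (fun r => r.2 == q.2)).isSome := List.find?_isSome.mpr ⟨q, hq, by simp⟩
  obtain ⟨p', hp'⟩ := Option.isSome_iff_exists.mp hps
  obtain ⟨q', hq'⟩ := Option.isSome_iff_exists.mp hqs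
  have hpv : p'.2 = p.2 := by simpa using List.find?_some hp'
  have hqv : q'.2 = q.2 := by simpa using List.find?_some hq'
  have h1 : p'.1 = q'.1 := by simpa [pvK, hp', hq'] using hkv
  have : p' = q' := List.inj_on_of_nodup_map h (List.mem_of_find?_eq_some hp')
    (List.mem_of_find?_eq_some hq') h1
  rw [← hpv, ← hqv, this]

-- ===== VERDICT (by name: the statement is the Claim_ definition above) =====
theorem get_sorted_files_dict_spec : Claim_equal_get_sorted_files_dict := by
  intro fd _
  unfold Spec_get_sorted_files_dict get_sorted_files_dict get_sorted_files_dict_alt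
  set d := PySem.Dict.ofList fd with hdd
  set l := d.items with hl
  have hnd : d.keys.Nodup := PySem.Dict.nodup_keys_ofList fd
  have hndf : (l.map Prod.fst).Nodup := hnd
  have hvals : d.values = l.map Prod.snd := rfl
  have hinj : ∀ v ∈ l.map Prod.snd, ∀ w ∈ l.map Prod.snd, pvK l v = pvK l w → v = w :=
    fun v hv w hw => pvK_inj l hndf v w hv hw
  -- A side
  have hA : (PySem.List.sorted d.values (fun v => v) false).foldl
      (fun acc v => pvAInner d v acc d.keys) PySem.Dict.empty
      = (PySem.List.sorted d.values (fun v => v) false).foldl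
      (fun acc v => acc.insert (pvK l v) v) PySem.Dict.empty := by
    apply PySem.List.foldl_congr_mem
    intro acc v hvmem
    have hv : v ∈ l.map Prod.snd := by
      rw [← hvals]; exact (PySem.List.mem_sorted _ _ _ _).mp hvmem
    rw [show d.keys = l.map Prod.fst from rfl, pvAInner_eq d hnd v acc l (fun p hp => hp),
      pvMatch_eq l v acc hv]
  have hAmem : ∀ v ∈ PySem.List.sorted d.values (fun v => v) false, v ∈ l.map Prod.snd := by
    intro v hvmem
    rw [← hvals]; exact (PySem.List.mem_sorted _ _ _ _).mp hvmem
  have hAitems : ((PySem.List.sorted d.values (fun v => v) false).foldl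
      (fun acc v => acc.insert (pvK l v) v) PySem.Dict.empty).items
      = (PySem.Set.ofList (PySem.List.sorted d.values (fun v => v) false)).map
          (fun v => (pvK l v, v)) :=
    pvFoldInsert (pvK l) _ [] PySem.Dict.empty (by rfl)
      (by simpa using fun v hv w hw => hinj v (hAmem v hv) w (hAmem w hw))
  -- B side
  set fk := l.foldl (fun fk p => if fk.contains p.2 then fk else fk.insert p.2 p.1)
      (PySem.Dict.empty : PySem.Dict Int String) with hfk
  have hfkkeys : fk.keys = PySem.Set.ofList (l.map Prod.snd) := by
    rw [hfk, pvFk_keys]; rfl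
  have hgetD : ∀ v, fk.getD v "" = pvK l v := by
    intro v
    rw [PySem.Dict.getD_eq_get?_getD, hfk, pvFk_get?]
    simp [pvK]
  have hfun : (fun (out : PySem.Dict String Int) v => out.insert (fk.getD v "") v)
      = (fun (out : PySem.Dict String Int) v => out.insert (pvK l v) v) :=
    funext fun out => funext fun v => by rw [hgetD]
  have hBmem : ∀ v ∈ PySem.List.sorted fk.keys (fun v => v) false, v ∈ l.map Prod.snd := by
    intro v hvmem
    have := (PySem.List.mem_sorted _ _ _ _).mp hvmem
    rw [hfkkeys] at this
    exact (PySem.Set.mem_ofList _ _).mp this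
  have hBitems : ((PySem.List.sorted fk.keys (fun v => v) false).foldl
      (fun out v => out.insert (pvK l v) v) PySem.Dict.empty).items
      = (PySem.Set.ofList (PySem.List.sorted fk.keys (fun v => v) false)).map
          (fun v => (pvK l v, v)) :=
    pvFoldInsert (pvK l) _ [] PySem.Dict.empty (by rfl)
      (by simpa using fun v hv w hw => hinj v (hBmem v hv) w (hBmem w hw))
  -- assemble
  show ((PySem.List.sorted d.values (fun v => v) false).foldl
      (fun acc v => pvAInner d v acc d.keys) PySem.Dict.empty).items = _
  rw [hA, hAitems]
  show _ = ((PySem.List.sorted fk.keys (fun v => v) false).foldl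
      (fun out v => out.insert (fk.getD v "") v) PySem.Dict.empty).items
  rw [hfun, hBitems]
  have hdv : PySem.Set.ofList (PySem.List.sorted fk.keys (fun v => v) false)
      = PySem.Set.ofList (PySem.List.sorted d.values (fun v => v) false) := by
    rw [hfkkeys, ← hvals, pvSorted_ofList d.values, PySem.Set.ofList_ofList]
  rw [hdv]
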